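-- pv_equiv track=rewrite | github.com/ashaysriv/flikcer | flikcer/epilepsy/utils.py | get_ep_and_rm_frm
-- ===== SOURCE A (Python) =====
-- def get_ep_and_rm_frm(fin_frames, fin):
--     ep_frm = []
--     rem_frm = []
--
--     prev = 0
--     for x in range(len(fin)) :
--         if abs(fin[x]) >= 20 :
--             frame_inc = fin_frames[x] - prev
--             prev = fin_frames[x]
--             rem_frm.append(fin_frames[x])
--             ep_frm.append(frame_inc)
--     return ep_frm, rem_frm
-- ===== SOURCE B (Python) =====
-- def get_ep_and_rm_frm(fin_frames, fin):
--     rem_frm = [fin_frames[x] for x in range(len(fin)) if abs(fin[x]) >= 20]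
--     ep_frm = [b - a for a, b in zip([0] + rem_frm, rem_frm)]
--     return ep_frm, rem_frm
-- ===== Notes on version B (the rewrite author's own statement) =====
-- stated objective: simpler
-- what changed: Replaces the single fused loop threading a 'prev' accumulator with two passes: select the kept frames first, then compute increments as pairwise differences of the kept list (zip with a 0-prefixed shift).
import Mathlib
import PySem

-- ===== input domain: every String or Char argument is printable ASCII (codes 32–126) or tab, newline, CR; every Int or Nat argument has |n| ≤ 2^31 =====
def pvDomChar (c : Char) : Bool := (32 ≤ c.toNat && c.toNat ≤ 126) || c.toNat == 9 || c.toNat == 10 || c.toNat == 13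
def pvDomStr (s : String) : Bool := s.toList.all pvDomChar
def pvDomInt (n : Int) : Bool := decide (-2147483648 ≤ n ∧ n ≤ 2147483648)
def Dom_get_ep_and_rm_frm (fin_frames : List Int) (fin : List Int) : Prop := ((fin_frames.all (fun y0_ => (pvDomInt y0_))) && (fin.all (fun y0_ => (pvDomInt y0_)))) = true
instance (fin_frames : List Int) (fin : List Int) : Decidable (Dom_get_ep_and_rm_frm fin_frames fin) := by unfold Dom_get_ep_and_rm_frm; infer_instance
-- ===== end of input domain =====

-- B replaces A's fused loop with a 'prev' accumulator by two passes (select, then pairwise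
-- differences of the selected list); objective: simpler. Equivalence is on the return value.

-- ===== PORT A =====
-- fin_frames[x] / fin[x] are ported with pyGetD 0: exact inside Pre_ (x < len(fin) always,
-- and Pre_ guarantees x < len(fin_frames) whenever the branch fires).
def get_ep_and_rm_frm (fin_frames : List Int) (fin : List Int) : List Int × List Int :=
  let st := (PySem.List.pyRange 0 (fin.length : Int) 1).foldl
    (fun (s : List Int × List Int × Int) x =>
      if 20 ≤ |PySem.List.pyGetD fin x 0| then
        let frame_inc := PySem.List.pyGetD fin_frames x 0 - s.2.2
        (s.1 ++ [frame_inc], s.2.1 ++ [PySem.List.pyGetD fin_frames x 0],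
         PySem.List.pyGetD fin_frames x 0)
      else s)
    ([], [], 0)
  (st.1, st.2.1)

-- ===== PORT B =====
def get_ep_and_rm_frm_alt (fin_frames : List Int) (fin : List Int) : List Int × List Int :=
  let rem_frm := (PySem.List.pyRange 0 (fin.length : Int) 1).filterMap
    (fun x => if 20 ≤ |PySem.List.pyGetD fin x 0| then some (PySem.List.pyGetD fin_frames x 0) else none)
  let ep_frm := List.zipWith (fun a b => b - a) (0 :: rem_frm) rem_frm
  (ep_frm, rem_frm)

-- ===== PRECONDITION & SPEC =====
-- Pre_ excludes exactly the inputs where Python A raises IndexError: a qualifying index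
-- (abs(fin[x]) >= 20) that is out of range for fin_frames.
def Pre_get_ep_and_rm_frm (fin_frames : List Int) (fin : List Int) : Prop :=
  ∀ x : Nat, x < fin.length → 20 ≤ |fin.getD x 0| → x < fin_frames.length
instance (fin_frames : List Int) (fin : List Int) : Decidable (Pre_get_ep_and_rm_frm fin_frames fin) := by unfold Pre_get_ep_and_rm_frm; infer_instance

def pvWitness_get_ep_and_rm_frm : List Int × List Int := ([3, 7, 11], [25, 0, -21])

def Spec_get_ep_and_rm_frm (fin_frames : List Int) (fin : List Int) (out : List Int × List Int) : Prop := out = get_ep_and_rm_frm_alt fin_frames fin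
instance (fin_frames : List Int) (fin : List Int) (out : List Int × List Int) : Decidable (Spec_get_ep_and_rm_frm fin_frames fin out) := by unfold Spec_get_ep_and_rm_frm; infer_instance

-- ===== CLAIM (what is proved, stated in full; the proofs are below) =====
def Claim_equal_get_ep_and_rm_frm : Prop := ∀ (fin_frames : List Int) (fin : List Int), Dom_get_ep_and_rm_frm fin_frames fin → Pre_get_ep_and_rm_frm fin_frames fin → Spec_get_ep_and_rm_frm fin_frames fin (get_ep_and_rm_frm fin_frames fin)

-- ===== LEMMAS AND PROOFS =====

-- Loop invariant: A's fold over any index list equals (B-style diffs, selected list, last prev).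
theorem pv_loop_inv (fin_frames fin : List Int) (L : List Int) :
    ∀ (ep rem : List Int) (prev : Int),
      L.foldl
        (fun (s : List Int × List Int × Int) x =>
          if 20 ≤ |PySem.List.pyGetD fin x 0| then
            let frame_inc := PySem.List.pyGetD fin_frames x 0 - s.2.2
            (s.1 ++ [frame_inc], s.2.1 ++ [PySem.List.pyGetD fin_frames x 0],
             PySem.List.pyGetD fin_frames x 0)
          else s)
        (ep, rem, prev)
      =
      (ep ++ List.zipWith (fun a b => b - a)
          (prev :: L.filterMap (fun x => if 20 ≤ |PySem.List.pyGetD fin x 0| then some (PySem.List.pyGetD fin_frames x 0) else none))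
          (L.filterMap (fun x => if 20 ≤ |PySem.List.pyGetD fin x 0| then some (PySem.List.pyGetD fin_frames x 0) else none)),
       rem ++ L.filterMap (fun x => if 20 ≤ |PySem.List.pyGetD fin x 0| then some (PySem.List.pyGetD fin_frames x 0) else none),
       (L.filterMap (fun x => if 20 ≤ |PySem.List.pyGetD fin x 0| then some (PySem.List.pyGetD fin_frames x 0) else none)).getLastD prev) := by
  induction L with
  | nil => intro ep rem prev; simp
  | cons x L ih =>
    intro ep rem prev
    by_cases h : 20 ≤ |PySem.List.pyGetD fin x 0|
    · simp only [List.foldl_cons, List.filterMap_cons, if_pos h]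
      rw [ih, List.zipWith_cons_cons, ← List.getLastD_cons (a := prev)]
      simp only [List.append_assoc, List.singleton_append]
    · simp only [List.foldl_cons, List.filterMap_cons, if_neg h]
      rw [ih]

-- ===== VERDICT (by name: the statement is the Claim_ definition above) =====
theorem get_ep_and_rm_frm_spec : Claim_equal_get_ep_and_rm_frm := by
  intro fin_frames fin _ _
  unfold Spec_get_ep_and_rm_frm get_ep_and_rm_frm get_ep_and_rm_frm_alt
  rw [pv_loop_inv]
  simp
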